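-- pv_equiv track=rewrite | github.com/threefoldo/MAC-SQL | workflow_v2/src/utils.py | parse_single_sql
-- ===== SOURCE A (Python) =====
-- def parse_single_sql(res: str) -> str:  # if do not need decompose, just one code block is OK!
--     """Return SQL in markdown block"""
--     lines = res.split('\n')
--     iter, start_idx, end_idx = -1, -1, -1
--     for idx in range(iter + 1, len(lines)):
--         if '```' in lines[idx]:
--             start_idx = idx
--             break
--     if start_idx == -1: return ""
--     for idx in range(start_idx + 1, len(lines)):
--         if '```' in lines[idx]:
--             end_idx = idx
--             break
--     if end_idx == -1: return f"error: \n{res}"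
--
--     return " ".join(lines[start_idx + 1: end_idx])
-- ===== SOURCE B (Python) =====
-- def parse_single_sql(res: str) -> str:
--     # single-pass state machine: 0 = before first fence, 1 = inside block, 2 = closed
--     state, body = 0, []
--     for line in res.split('\n'):
--         if '```' in line:
--             if state == 0:
--                 state = 1
--             else:
--                 state = 2
--                 break
--         elif state == 1:
--             body.append(line)
--     if state == 0:
--         return ""
--     if state == 1:
--         return f"error: \n{res}"
--     return " ".join(body)
-- ===== Notes on version B (the rewrite author's own statement) =====
-- stated objective: alternative
-- what changed: Replaces A's two staged early-breaking index scans (with -1 sentinels and slicing) by a single pass over the lines driven by a three-state machine that accumulates the block body as it goes.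
import Mathlib
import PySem

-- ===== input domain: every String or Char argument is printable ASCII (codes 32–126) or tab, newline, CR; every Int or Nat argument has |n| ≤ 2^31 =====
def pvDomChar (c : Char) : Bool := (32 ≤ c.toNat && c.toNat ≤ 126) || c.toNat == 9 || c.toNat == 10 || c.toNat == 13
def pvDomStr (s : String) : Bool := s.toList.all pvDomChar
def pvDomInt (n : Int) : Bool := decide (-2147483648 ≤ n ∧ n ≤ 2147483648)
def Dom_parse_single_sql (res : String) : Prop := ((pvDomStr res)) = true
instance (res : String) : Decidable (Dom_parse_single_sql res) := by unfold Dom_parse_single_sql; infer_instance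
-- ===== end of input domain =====

-- B replaces A's two staged early-breaking index scans (-1 sentinels plus slicing)
-- by a single pass over the lines with a three-state machine accumulating the body.

-- '```' in line (shared literal helper for both ports)
def pvFence (l : List Char) : Bool := PySem.Chars.isIn "```".toList l

-- ===== PORT A =====
-- A's early-breaking for-loop: index of the first line (counting from s) containing "```"; -1 if none
def pvScanA : List (List Char) → Int → Int
  | [], _ => -1
  | l :: ls, s => if pvFence l then s else pvScanA ls (s + 1)

def parse_single_sql (res : String) : String :=
  let lines := PySem.Chars.splitOn res.toList ['\n']
  let start_idx := pvScanA lines 0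
  if start_idx = -1 then ""
  else
    let end_idx := pvScanA (PySem.List.slice lines (some (start_idx + 1)) none) (start_idx + 1)
    if end_idx = -1 then "error: \n" ++ res
    else String.ofList (PySem.Chars.join [' '] (PySem.List.slice lines (some (start_idx + 1)) (some end_idx)))

-- ===== PORT B =====
-- B's single loop: state 0 = before first fence, 1 = inside block (collect), 2 = closed (break)
def pvScanB : List (List Char) → Nat → List (List Char) → Nat × List (List Char)
  | [], st, body => (st, body)
  | l :: ls, st, body =>
    if pvFence l then
      if st = 0 then pvScanB ls 1 body
      else (2, body)
    else if st = 1 then pvScanB ls 1 (body ++ [l])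
    else pvScanB ls st body

def parse_single_sql_alt (res : String) : String :=
  let lines := PySem.Chars.splitOn res.toList ['\n']
  let r := pvScanB lines 0 []
  if r.1 = 0 then ""
  else if r.1 = 1 then "error: \n" ++ res
  else String.ofList (PySem.Chars.join [' '] r.2)

-- ===== PRECONDITION & SPEC =====
def Spec_parse_single_sql (res : String) (out : String) : Prop := out = parse_single_sql_alt res
instance (res : String) (out : String) : Decidable (Spec_parse_single_sql res out) := by unfold Spec_parse_single_sql; infer_instance

-- ===== CLAIM (what is proved, stated in full; the proofs are below) =====
def Claim_equal_parse_single_sql : Prop := ∀ (res : String), Dom_parse_single_sql res → Spec_parse_single_sql res (parse_single_sql res)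

-- ===== LEMMAS AND PROOFS =====

-- every list of lines is fence-free or splits at its first fence line
theorem pvSplit (ls : List (List Char)) :
    (∀ l ∈ ls, pvFence l = false) ∨
    ∃ pre l post, ls = pre ++ l :: post ∧
      (∀ m ∈ pre, pvFence m = false) ∧ pvFence l = true := by
  induction ls with
  | nil => exact Or.inl (by simp)
  | cons l ls ih =>
    by_cases h : pvFence l
    · exact Or.inr ⟨[], l, ls, by simp, by simp, h⟩
    · rcases ih with hff | ⟨pre, m, post, hls, hpre, hm⟩
      · refine Or.inl ?_
        intro x hx
        rcases List.mem_cons.mp hx with rfl | hx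
        · simpa using h
        · exact hff x hx
      · refine Or.inr ⟨l :: pre, m, post, by simp [hls], ?_, hm⟩
        intro x hx
        rcases List.mem_cons.mp hx with rfl | hx
        · simpa using h
        · exact hpre x hx

theorem pvScanA_none (ls : List (List Char)) (s : Int)
    (h : ∀ l ∈ ls, pvFence l = false) : pvScanA ls s = -1 := by
  induction ls generalizing s with
  | nil => rfl
  | cons l ls ih =>
    rw [pvScanA, if_neg (by simp [h l (by simp)])]
    exact ih (s + 1) (fun x hx => h x (by simp [hx]))

theorem pvScanA_split (pre : List (List Char)) (l : List Char) (post : List (List Char)) (s : Int)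
    (hpre : ∀ m ∈ pre, pvFence m = false) (hl : pvFence l = true) :
    pvScanA (pre ++ l :: post) s = s + pre.length := by
  induction pre generalizing s with
  | nil => simp [pvScanA, hl]
  | cons m pre ih =>
    rw [List.cons_append, pvScanA, if_neg (by simp [hpre m (by simp)])]
    rw [ih (s + 1) (fun x hx => hpre x (by simp [hx]))]
    push_cast [List.length_cons]; ring

theorem pvScanB_none (ls : List (List Char)) (st : Nat) (body : List (List Char))
    (h : ∀ l ∈ ls, pvFence l = false) :
    pvScanB ls st body = (st, if st = 1 then body ++ ls else body) := by
  induction ls generalizing body with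
  | nil => simp [pvScanB]
  | cons l ls ih =>
    rw [pvScanB, if_neg (by simp [h l (by simp)])]
    by_cases hst : st = 1
    · subst hst
      rw [if_pos rfl, ih _ (fun x hx => h x (by simp [hx]))]
      simp
    · rw [if_neg hst, ih _ (fun x hx => h x (by simp [hx])), if_neg hst, if_neg hst]

theorem pvScanB_split0 (pre : List (List Char)) (l : List Char) (post : List (List Char))
    (body : List (List Char))
    (hpre : ∀ m ∈ pre, pvFence m = false) (hl : pvFence l = true) :
    pvScanB (pre ++ l :: post) 0 body = pvScanB post 1 body := by
  induction pre with
  | nil => simp [pvScanB, hl]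
  | cons m pre ih =>
    rw [List.cons_append, pvScanB, if_neg (by simp [hpre m (by simp)]),
      if_neg (by decide : ¬ (0 : Nat) = 1)]
    exact ih (fun x hx => hpre x (by simp [hx]))

theorem pvScanB_split1 (pre : List (List Char)) (l : List Char) (post : List (List Char))
    (body : List (List Char))
    (hpre : ∀ m ∈ pre, pvFence m = false) (hl : pvFence l = true) :
    pvScanB (pre ++ l :: post) 1 body = (2, body ++ pre) := by
  induction pre generalizing body with
  | nil => simp [pvScanB, hl]
  | cons m pre ih =>
    rw [List.cons_append, pvScanB, if_neg (by simp [hpre m (by simp)]), if_pos rfl]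
    rw [ih _ (fun x hx => hpre x (by simp [hx]))]
    simp

theorem parse_single_sql_eq_alt (res : String) :
    parse_single_sql res = parse_single_sql_alt res := by
  unfold parse_single_sql parse_single_sql_alt
  dsimp only
  set lines := PySem.Chars.splitOn res.toList ['\n'] with hlines
  rcases pvSplit lines with hff | ⟨pre1, l1, rest, hls, hpre1, hl1⟩
  · rw [pvScanA_none lines 0 hff, pvScanB_none lines 0 [] hff]
    simp
  · rw [hls, pvScanA_split pre1 l1 rest 0 hpre1 hl1, pvScanB_split0 pre1 l1 rest [] hpre1 hl1]
    rw [if_neg (by omega : ¬ ((0:Int) + pre1.length = -1))]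
    have hfrom : (0 : Int) + (pre1.length : Int) + 1 = ((pre1.length + 1 : Nat) : Int) := by
      push_cast; ring
    have hslice : PySem.List.slice (pre1 ++ l1 :: rest) (some ((0:Int) + pre1.length + 1)) none = rest := by
      rw [hfrom, PySem.List.slice_from_natCast]
      simp
    rw [hslice]
    rcases pvSplit rest with hff2 | ⟨pre2, l2, post2, hrest, hpre2, hl2⟩
    · rw [pvScanA_none rest _ hff2, pvScanB_none rest 1 [] hff2]
      simp
    · rw [hrest, pvScanA_split pre2 l2 post2 _ hpre2 hl2,
        pvScanB_split1 pre2 l2 post2 [] hpre2 hl2]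
      rw [if_neg (by omega : ¬ ((0:Int) + pre1.length + 1 + pre2.length = -1))]
      have hslice2 : PySem.List.slice (pre1 ++ l1 :: (pre2 ++ l2 :: post2))
          (some ((0:Int) + pre1.length + 1)) (some ((0:Int) + pre1.length + 1 + pre2.length)) = pre2 := by
        rw [hfrom, PySem.List.slice_natCast_add,
          show pre1 ++ l1 :: (pre2 ++ l2 :: post2) = (pre1 ++ [l1]) ++ (pre2 ++ l2 :: post2) from by simp,
          show pre1.length + 1 = (pre1 ++ [l1]).length from by simp,
          List.drop_left, List.take_left]
      rw [hslice2]
      simp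

-- ===== VERDICT (by name: the statement is the Claim_ definition above) =====
theorem parse_single_sql_spec : Claim_equal_parse_single_sql := by
  intro res _
  exact parse_single_sql_eq_alt res
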